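-- pv_equiv track=rewrite | github.com/evotext/seqsim | src/seqsim/common.py | collect_subseqs
-- ===== SOURCE A (Python) =====
-- from typing import Callable, Hashable, Union, List, Optional, Sequence, Tuple
--
-- def collect_subseqs(sequence: Sequence, sort: bool = True) -> List[Sequence]:
--     """
--     Collects all possible sub-sequences in a given sequence.
--
--     When sorting is requested, sub-sequences will first be sorted by their length and,
--     later, by comparing one with the other. Mixing types, like strings and integers, can
--     lead to unexpected results and is not suggested if the type cannot be guaranteed.
--
--     Note that this function performs simple comprehensions, neither using padding
--     symbols nor the more complex methods n-gram collection methods ultimately based on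
--     `ngram_iter()`.
--
--     Examples
--     --------
--     collect_subseqs('abcde')
--     ['a', 'b', 'c', 'd', 'e', 'ab', 'bc', 'cd', 'de', 'abc', 'bcd', 'cde', 'abcd', 'bcde', 'abcde']
--
--     :param sequence: The sequence that shall be converted into it's ngram-representation.
--     :param sort: Whether to sort the list of ngrams by length and by identity
--         (default: True).
--     :return: A list of all ngrams of the input sequence.
--     """
--
--     # Cache the length of the sequence
--     length = len(sequence)
--
--     # Set the starting index
--     idx = 0
--
--     # define the output list
--     ret = []
--
--     # start the while loop
--     while idx != length and idx < length:
--         # copy the sequence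
--         new_sequence = sequence[idx:length]
--
--         # append the sequence to the output list
--         ret += [new_sequence]
--
--         # loop over the new sequence
--         for j in range(1, len(new_sequence)):
--             ret += [new_sequence[:j]]
--             ret += [new_sequence[j:]]
--
--         # increment idx and decrement length
--         idx += 1
--         length -= 1
--
--     if sort:
--         # We try to sort normally; if there is a TypeError, such as when the list has mixed
--         # ints and strings, we sort by the string representation of all elements
--         # TODO: do it in a better way
--         try:
--             ret = sorted(ret, key=lambda e: (len(e), e))
--         except TypeError:
--             ret = sorted(ret, key=lambda e: (len(str(e)), str(e)))
--
--     return ret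
-- ===== SOURCE B (Python) =====
-- def collect_subseqs(sequence, sort: bool = True):
--     """Collect all contiguous sub-sequences, optionally sorted (recursive nesting decomposition)."""
--
--     def windows(s):
--         # the outermost window, then the interleaved prefix/suffix pairs,
--         # then recurse into the window peeled at both ends
--         if len(s) == 0:
--             return []
--         pairs = [x for j in range(1, len(s)) for x in (s[:j], s[j:])]
--         return [s] + pairs + windows(s[1:-1])
--
--     ret = windows(sequence)
--
--     if sort:
--         # strings/homogeneous sequences sort by (length, identity); mixed types
--         # fall back to string representation, exactly as the original
--         try:
--             ret = sorted(ret, key=lambda e: (len(e), e))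
--         except TypeError:
--             ret = sorted(ret, key=lambda e: (len(str(e)), str(e)))
--     return ret
-- ===== Notes on version B (the rewrite author's own statement) =====
-- stated objective: alternative
-- what changed: Replaces A's imperative idx/length two-pointer peeling loop with accumulator list by a recursive windows(s) helper that emits the window, the interleaved prefix/suffix pairs as one comprehension, and recurses on s[1:-1], producing the same list in the same order; the sort block is unchanged.
import Mathlib
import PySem

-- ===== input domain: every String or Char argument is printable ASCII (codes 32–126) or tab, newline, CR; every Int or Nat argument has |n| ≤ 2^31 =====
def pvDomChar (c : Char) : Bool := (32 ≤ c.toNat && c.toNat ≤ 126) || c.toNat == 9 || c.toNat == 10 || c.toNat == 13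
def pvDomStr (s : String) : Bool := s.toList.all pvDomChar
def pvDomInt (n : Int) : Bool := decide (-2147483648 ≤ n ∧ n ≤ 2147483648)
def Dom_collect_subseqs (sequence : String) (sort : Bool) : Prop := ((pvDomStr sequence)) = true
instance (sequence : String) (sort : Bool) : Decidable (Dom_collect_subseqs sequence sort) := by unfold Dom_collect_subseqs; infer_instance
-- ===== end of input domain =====

-- B re-decomposes A's idx/length peeling loop as a recursion on the nested window
-- (same output, same order); objective: alternative decomposition, no speed claim.

-- ===== PORT A =====
-- A's while loop over (idx, length), accumulating into ret; the sequence elements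
-- are strings' characters, so the try-branch sort key (len(e), e) never raises
-- TypeError and only the try branch is ported.
def pvLoopA (seq : List Char) (idx length : Int) (ret : List (List Char)) :
    List (List Char) :=
  if h : idx ≠ length ∧ idx < length then
    let new_sequence := PySem.List.slice seq (some idx) (some length)
    let ret1 := ret ++ [new_sequence]
    let ret2 := (PySem.List.pyRange 1 (new_sequence.length : Int) 1).foldl
      (fun acc j =>
        (acc ++ [PySem.List.slice new_sequence none (some j)])
          ++ [PySem.List.slice new_sequence (some j) none]) ret1
    pvLoopA seq (idx + 1) (length - 1) ret2
  else ret
termination_by (length - idx).toNat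
decreasing_by omega

def collect_subseqs (sequence : String) (sort : Bool) : List String :=
  let ret := pvLoopA sequence.toList 0 (sequence.toList.length : Int) []
  let ret := if sort then
      PySem.List.sorted2 ret (fun e => (e.length : Int)) (fun e => e) false
    else ret
  ret.map String.ofList

-- ===== PORT B =====
-- length of s[1:-1] strictly shrinks (termination of the nested-window recursion)
theorem pvSliceMidLen (s : List Char) (h : s ≠ []) :
    (PySem.List.slice s (some 1) (some (-1))).length < s.length := by
  rcases s with _ | ⟨c, t⟩
  · simp at h
  · simp [PySem.List.slice, PySem.List.clampIdx]

-- windows(s): the full window, the interleaved prefix/suffix pairs, then recurse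
-- into s[1:-1]
def pvWindows (s : List Char) : List (List Char) :=
  if h : s = [] then []
  else
    s :: ((PySem.List.pyRange 1 (s.length : Int) 1).flatMap
          (fun j => [PySem.List.slice s none (some j),
                     PySem.List.slice s (some j) none])
        ++ pvWindows (PySem.List.slice s (some 1) (some (-1))))
termination_by s.length
decreasing_by exact pvSliceMidLen s h

def collect_subseqs_alt (sequence : String) (sort : Bool) : List String :=
  let ret := pvWindows sequence.toList
  let ret := if sort then
      PySem.List.sorted2 ret (fun e => (e.length : Int)) (fun e => e) false
    else ret
  ret.map String.ofList

-- ===== PRECONDITION & SPEC =====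
def Spec_collect_subseqs (sequence : String) (sort : Bool) (out : List String) : Prop := out = collect_subseqs_alt sequence sort
instance (sequence : String) (sort : Bool) (out : List String) : Decidable (Spec_collect_subseqs sequence sort out) := by unfold Spec_collect_subseqs; infer_instance

-- ===== CLAIM (what is proved, stated in full; the proofs are below) =====
def Claim_equal_collect_subseqs : Prop := ∀ (sequence : String) (sort : Bool), Dom_collect_subseqs sequence sort → Spec_collect_subseqs sequence sort (collect_subseqs sequence sort)

-- ===== LEMMAS AND PROOFS =====

-- s[1:-1] in drop/take form
theorem pv_slice_mid (s : List Char) :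
    PySem.List.slice s (some 1) (some (-1)) = s.tail.dropLast := by
  simp [PySem.List.slice]
  rcases s with _ | ⟨c, t⟩ <;> simp [List.dropLast_eq_take]

-- the nested window of the original sequence, in two readings
theorem pv_window_step (seq : List Char) (a b : Nat) (h1 : a < b) (h2 : b ≤ seq.length) :
    ((seq.drop a).take (b - a)).tail.dropLast = (seq.drop (a + 1)).take (b - 1 - (a + 1)) := by
  apply List.ext_getElem
  · simp; omega
  · intro i hi1 hi2
    simp [List.getElem_dropLast, List.getElem_tail]
    have : a + (i + 1) = a + 1 + i := by omega
    simp [this]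

-- the loop invariant: A's loop appends exactly B's windows of the current slice
theorem pvLoopA_eq_windows (seq : List Char) (a b : Nat) (ret : List (List Char))
    (h2 : b ≤ seq.length) :
    pvLoopA seq (a : Int) (b : Int) ret
      = ret ++ pvWindows ((seq.drop a).take (b - a)) := by
  have hslice : PySem.List.slice seq (some (a : Int)) (some (b : Int))
      = (seq.drop a).take (b - a) := PySem.List.slice_natCast seq a b
  by_cases hlt : a < b
  · -- loop body fires
    rw [pvLoopA]
    have hcond : ((a : Int) ≠ (b : Int) ∧ (a : Int) < (b : Int)) := by
      constructor <;> [skip; exact_mod_cast hlt]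
      intro h; omega
    rw [dif_pos hcond]
    simp only [hslice]
    set w : List Char := (seq.drop a).take (b - a) with hw
    have hwlen : w.length = b - a := by
      simp [hw]; omega
    have hwne : w ≠ [] := by
      intro h
      rw [h] at hwlen
      simp at hwlen; omega
    -- the inner for-loop as a flatMap
    have hfold : ∀ (r : List (List Char)),
        (PySem.List.pyRange 1 (w.length : Int) 1).foldl
          (fun acc j => (acc ++ [PySem.List.slice w none (some j)])
              ++ [PySem.List.slice w (some j) none]) r
        = r ++ (PySem.List.pyRange 1 (w.length : Int) 1).flatMap
            (fun j => [PySem.List.slice w none (some j),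
                       PySem.List.slice w (some j) none]) := by
      intro r
      have : (fun (acc : List (List Char)) j =>
            (acc ++ [PySem.List.slice w none (some j)])
              ++ [PySem.List.slice w (some j) none])
          = (fun acc j => acc ++ [PySem.List.slice w none (some j),
                                  PySem.List.slice w (some j) none]) := by
        funext acc j; simp
      rw [this, PySem.List.foldl_append_eq_flatMap]
    rw [hfold]
    -- recursive call: next indices give the nested window
    have ha1 : ((a : Int) + 1) = ((a + 1 : Nat) : Int) := by push_cast; ring
    have hb1 : ((b : Int) - 1) = ((b - 1 : Nat) : Int) := by omega
    rw [ha1, hb1,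
        pvLoopA_eq_windows seq (a + 1) (b - 1) _ (by omega)]
    have hnest : (seq.drop (a + 1)).take (b - 1 - (a + 1)) = w.tail.dropLast := by
      rw [hw, pv_window_step seq a b hlt h2]
    rw [hnest]
    -- unfold B's recursion once on the same window
    conv_rhs => rw [pvWindows, dif_neg hwne, pv_slice_mid]
    simp
  · -- loop exits: the window is empty
    rw [pvLoopA]
    have hneg : ¬ ((a : Int) ≠ (b : Int) ∧ (a : Int) < (b : Int)) := by
      rintro ⟨-, h⟩; exact hlt (by exact_mod_cast h)
    rw [dif_neg hneg]
    have hba : b - a = 0 := by omega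
    simp [hba, pvWindows]
termination_by (b - a)

-- ===== VERDICT (by name: the statement is the Claim_ definition above) =====
theorem collect_subseqs_spec : Claim_equal_collect_subseqs := by
  intro sequence sort _
  unfold Spec_collect_subseqs collect_subseqs collect_subseqs_alt
  have h0 : ((0 : Int)) = ((0 : Nat) : Int) := rfl
  rw [h0, pvLoopA_eq_windows sequence.toList 0 sequence.toList.length []
        (le_refl _)]
  simp only [Nat.sub_zero, List.drop_zero, List.take_length, List.nil_append]
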